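-- pv_equiv track=rewrite | github.com/RohenSerna1/RohenSerna | src/scrabbleCalculator.py | calculate_scrabble_score
-- ===== SOURCE A (Python) =====
-- def calculate_scrabble_score(word):
--     letter_scores = {
--         'A': 1, 'B': 3, 'C': 3, 'D': 2, 'E': 1,
--         'F': 4, 'G': 2, 'H': 4, 'I': 1, 'J': 8,
--         'K': 5, 'L': 1, 'M': 3, 'N': 1, 'O': 1,
--         'P': 3, 'Q': 10, 'R': 1, 'S': 1, 'T': 1,
--         'U': 4, 'V': 4, 'W': 4, 'X': 8, 'Y': 4,
--         'Z': 10
--     }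
--
--     def get_letter_score(char):
--         return letter_scores[char.upper()]
--
--     total_score = 0
--     word_multiplier = 1
--     is_seven_letter_word = len(word.replace('*', '').replace('**', '').replace('^', '')) == 7
--
--     i = 0
--     while i < len(word):
--         char = word[i]
--
--         if char.isalpha():
--             score = get_letter_score(char)
--             total_score += score
--
--             if i + 1 < len(word) and word[i + 1] == '*':
--                 total_score += score
--                 i += 1
--             elif i + 1 < len(word) and word[i + 1] == '*':
--                 total_score += score * 2
--                 i += 1
--
--         i += 1
--
--     if word.endswith('d'):
--         total_score *= 2
--     elif word.endswith('t'):
--         total_score *= 3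
--
--     if is_seven_letter_word:
--         total_score += 50
--
--     return total_score
-- ===== SOURCE B (Python) =====
-- def calculate_scrabble_score(word):
--     letter_scores = {
--         'A': 1, 'B': 3, 'C': 3, 'D': 2, 'E': 1,
--         'F': 4, 'G': 2, 'H': 4, 'I': 1, 'J': 8,
--         'K': 5, 'L': 1, 'M': 3, 'N': 1, 'O': 1,
--         'P': 3, 'Q': 10, 'R': 1, 'S': 1, 'T': 1,
--         'U': 4, 'V': 4, 'W': 4, 'X': 8, 'Y': 4,
--         'Z': 10
--     }
--
--     total_score = 0
--     pending = 0
--     for char in word: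
--         if char.isalpha():
--             score = letter_scores[char.upper()]
--             total_score += score
--             pending = score
--         elif char == '*':
--             total_score += pending
--             pending = 0
--         else:
--             pending = 0
--
--     if word.endswith('d'):
--         total_score *= 2
--     elif word.endswith('t'):
--         total_score *= 3
--
--     if len(word.replace('*', '').replace('**', '').replace('^', '')) == 7:
--         total_score += 50
--
--     return total_score
-- ===== Notes on version B (the rewrite author's own statement) =====
-- stated objective: simpler
-- what changed: A's while-loop with a manual index and a one-character lookahead that consumes the star marker after a letter is replaced by a single for-loop over the characters that looks back via a `pending` last-letter-score accumulator (a star adds pending and clears it; any other non-letter clears it); the tail multiplier/bonus logic is unchanged.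
import Mathlib
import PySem

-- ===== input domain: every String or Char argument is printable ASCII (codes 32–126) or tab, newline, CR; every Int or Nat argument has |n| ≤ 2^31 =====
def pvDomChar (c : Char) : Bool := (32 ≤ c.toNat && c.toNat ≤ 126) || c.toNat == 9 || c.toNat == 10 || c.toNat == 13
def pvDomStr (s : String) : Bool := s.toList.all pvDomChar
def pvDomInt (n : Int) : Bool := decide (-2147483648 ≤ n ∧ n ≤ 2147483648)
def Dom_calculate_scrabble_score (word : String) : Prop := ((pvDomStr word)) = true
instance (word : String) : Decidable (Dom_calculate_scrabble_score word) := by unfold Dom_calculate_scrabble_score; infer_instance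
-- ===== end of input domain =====

-- B replaces A's while-loop with manual index and '*'-lookahead (which skips the consumed '*')
-- by a single fold that looks BACK via a `pending` last-letter-score accumulator; objective: simpler.

-- ===== PORT A =====
-- the letter_scores dict (shared verbatim by both Pythons)
def pvScores : PySem.Dict Char Int := PySem.Dict.ofList
  [('A',1), ('B',3), ('C',3), ('D',2), ('E',1),
   ('F',4), ('G',2), ('H',4), ('I',1), ('J',8),
   ('K',5), ('L',1), ('M',3), ('N',1), ('O',1),
   ('P',3), ('Q',10), ('R',1), ('S',1), ('T',1),
   ('U',4), ('V',4), ('W',4), ('X',8), ('Y',4),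
   ('Z',10)]

-- get_letter_score; the dict [] lookup is total here since A only calls it on ASCII letters (Dom)
def pvGetLetterScore (c : Char) : Int := (pvScores.get? (PySem.Chars.upperChar c)).getD 0

-- A's while loop: char = word[i]; 'i+1 < len(word) and word[i+1] == "*"' is rest.head? = some '*',
-- and the doubled letter's '*' is skipped (i += 2 in total).
-- (A's `elif` has the identical condition as the `if` before it, hence is unreachable and not re-emitted.)
def pvLoopA : List Char → Int → Int
  | [], total => total
  | c :: rest, total =>
    if PySem.Chars.isalpha c then
      if rest.head? = some '*' then pvLoopA rest.tail (total + pvGetLetterScore c + pvGetLetterScore c)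
      else pvLoopA rest (total + pvGetLetterScore c)
    else pvLoopA rest total
  termination_by cs _ => cs.length
  decreasing_by all_goals (simp_all [List.length_tail]; try omega)

def calculate_scrabble_score (word : String) : Int :=
  let is_seven := PySem.Str.len (PySem.Str.replace (PySem.Str.replace (PySem.Str.replace word "*" "") "**" "") "^" "") == 7
  let total0 := pvLoopA word.toList 0
  let total1 := if PySem.Str.endswith word "d" then total0 * 2
    else if PySem.Str.endswith word "t" then total0 * 3
    else total0
  if is_seven then total1 + 50 else total1

-- ===== PORT B =====
-- one step of B's for-loop: state = (total_score, pending)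
def pvStepB (st : Int × Int) (c : Char) : Int × Int :=
  if PySem.Chars.isalpha c then
    let s := (pvScores.get? (PySem.Chars.upperChar c)).getD 0
    (st.1 + s, s)
  else if c = '*' then (st.1 + st.2, (0 : Int))
  else (st.1, (0 : Int))

def calculate_scrabble_score_alt (word : String) : Int :=
  let total0 := (word.toList.foldl pvStepB ((0 : Int), (0 : Int))).1
  let total1 := if PySem.Str.endswith word "d" then total0 * 2
    else if PySem.Str.endswith word "t" then total0 * 3
    else total0
  if PySem.Str.len (PySem.Str.replace (PySem.Str.replace (PySem.Str.replace word "*" "") "**" "") "^" "") == 7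
  then total1 + 50 else total1

-- ===== PRECONDITION & SPEC =====
def Spec_calculate_scrabble_score (word : String) (out : Int) : Prop := out = calculate_scrabble_score_alt word
instance (word : String) (out : Int) : Decidable (Spec_calculate_scrabble_score word out) := by unfold Spec_calculate_scrabble_score; infer_instance

-- ===== CLAIM (what is proved, stated in full; the proofs are below) =====
def Claim_equal_calculate_scrabble_score : Prop := ∀ (word : String), Dom_calculate_scrabble_score word → Spec_calculate_scrabble_score word (calculate_scrabble_score word)

-- ===== LEMMAS AND PROOFS =====

lemma pvStepB_alpha (st : Int × Int) (c : Char) (h : PySem.Chars.isalpha c = true) :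
    pvStepB st c = (st.1 + pvGetLetterScore c, pvGetLetterScore c) := by
  simp [pvStepB, pvGetLetterScore, h]

lemma pvStepB_star (st : Int × Int) : pvStepB st '*' = (st.1 + st.2, 0) := by
  have h : PySem.Chars.isalpha '*' = false := by decide
  simp [pvStepB, h]

lemma pvStepB_other (st : Int × Int) (c : Char) (h1 : ¬ PySem.Chars.isalpha c = true)
    (h2 : c ≠ '*') : pvStepB st c = (st.1, 0) := by
  simp [pvStepB, h1, h2]

-- loop invariant: A's lookahead loop equals B's fold whenever the pending value is 0
-- in case the next character is a '*' (which A would then have consumed already)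
lemma pvLoop_eq_fold (cs : List Char) (t p : Int)
    (hp : cs.head? = some '*' → p = 0) :
    pvLoopA cs t = (cs.foldl pvStepB (t, p)).1 := by
  induction cs, t using pvLoopA.induct generalizing p with
  | case1 total => simp [pvLoopA]
  | case2 c rest total halpha hhead ih =>
      obtain ⟨rest2, rfl⟩ : ∃ r, rest = '*' :: r := by
        cases rest with
        | nil => simp at hhead
        | cons a r => simp at hhead; exact ⟨r, by rw [hhead]⟩
      simp only [pvLoopA, if_pos halpha, List.head?_cons, List.tail_cons,
        List.foldl_cons, pvStepB_alpha _ _ halpha, pvStepB_star]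
      exact ih _ (fun h => rfl)
  | case3 c rest total halpha hhead ih =>
      simp only [pvLoopA, if_pos halpha, if_neg hhead, List.foldl_cons,
        pvStepB_alpha _ _ halpha]
      exact ih _ (fun h => by simp [h] at hhead)
  | case4 c rest total halpha ih =>
      by_cases hc : c = '*'
      · subst hc
        have hp0 := hp rfl
        subst hp0
        simp only [pvLoopA, if_neg halpha, List.foldl_cons, pvStepB_star, add_zero]
        exact ih _ (fun h => rfl)
      · simp only [pvLoopA, if_neg halpha, List.foldl_cons, pvStepB_other _ _ halpha hc]
        exact ih _ (fun h => rfl)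

-- ===== VERDICT (by name: the statement is the Claim_ definition above) =====
theorem calculate_scrabble_score_spec : Claim_equal_calculate_scrabble_score := by
  intro word _
  unfold Spec_calculate_scrabble_score calculate_scrabble_score calculate_scrabble_score_alt
  rw [pvLoop_eq_fold word.toList 0 0 (fun _ => rfl)]
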